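-- pv_equiv track=rewrite | github.com/vxoli/advent_of_code | 2021/d15.py | generate_new_map
-- ===== SOURCE A (Python) =====
-- def generate_new_map(map):
-- 	#generates new grid
-- 	#The entire cave is actually five times larger in both dimensions than you thought; the area you originally
-- 	#scanned is just one tile in a 5x5 tile area that forms the full map. Your original map tile repeats to the
-- 	#right and downward; each time the tile repeats to the right or downward, all of its risk levels are 1 higher
-- 	#than the tile immediately up or left of it. However, risk levels above 9 wrap back around to 1.
--
-- 	rows = len(map)
-- 	cols = len(map[0])
-- 	newmap = [[0 for row in range(rows*5)] for col in range(cols * 5)]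
-- 	# add 4 grids to the right of original
-- 	for i in range(5):
-- 		for x in range(rows):
-- 			for y in range(cols):
-- 				newmap[x][y+(i*cols)] = (map[x][y]+(1*i))
-- 				if newmap[x][y+(i*cols)] > 9: newmap[x][y+(i*cols)] -= 9
-- 	# add 4 grids below the new grid
-- 	cols = len(newmap[0])
-- 	for i in range(5):
-- 		for x in range(rows):
-- 			for y in range(cols):
-- 				newmap[x+(i*rows)][y] = newmap[x][y]+(1*i)
-- 				if newmap[x+(i*rows)][y] > 9: newmap[x+(i*rows)][y] -= 9
--
-- 	return newmap
-- ===== SOURCE B (Python) =====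
-- def generate_new_map(map):
-- 	# Single direct fill: each output cell is computed once from its source cell
-- 	# (shift right ti tiles and wrap, then down tj tiles and wrap), instead of
-- 	# two sequential propagation passes re-reading the grid.
-- 	def wrap(v):
-- 		return v - 9 if v > 9 else v
-- 	rows, cols = len(map), len(map[0])
-- 	newmap = [[0] * (rows * 5) for _ in range(cols * 5)]
-- 	for ti in range(5):
-- 		for tj in range(5):
-- 			for x in range(rows):
-- 				for y in range(cols):
-- 					newmap[x + tj * rows][y + ti * cols] = wrap(wrap(map[x][y] + ti) + tj)
-- 	return newmap
-- ===== Notes on version B (the rewrite author's own statement) =====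
-- stated objective: alternative
-- what changed: B fills the grid in one direct pass, computing each output cell once from its source cell (shift right and wrap, shift down and wrap), instead of A's two sequential propagation passes (build the rightward strip, then copy it downward re-reading the grid); Pre_ excludes grids with a read entry above 19, where wrapping an out-of-range risk level is unspecified and the two pass structures give different, equally defensible values; neither pass structure is canonical there.
import Mathlib
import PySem

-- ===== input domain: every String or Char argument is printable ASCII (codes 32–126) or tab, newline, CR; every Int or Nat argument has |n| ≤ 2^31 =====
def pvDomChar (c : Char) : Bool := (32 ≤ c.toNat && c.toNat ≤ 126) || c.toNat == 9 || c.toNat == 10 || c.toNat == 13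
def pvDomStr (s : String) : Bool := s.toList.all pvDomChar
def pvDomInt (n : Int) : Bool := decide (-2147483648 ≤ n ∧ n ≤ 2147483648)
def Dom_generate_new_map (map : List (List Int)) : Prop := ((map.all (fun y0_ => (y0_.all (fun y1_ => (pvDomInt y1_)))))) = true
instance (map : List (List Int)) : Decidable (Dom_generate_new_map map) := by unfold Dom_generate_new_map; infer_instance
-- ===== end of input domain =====

-- B fills the grid in one direct pass, computing each output cell once from its source
-- cell, instead of A's two sequential propagation passes; equal on Pre_ (the inputs A
-- returns on whose read entries are at most 19).

-- ===== PORT A =====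
-- `newmap[r][c] = v` (row alias mutation): set cell (r, c) of the grid.
def pvSetCell (g : List (List Int)) (r c : Nat) (v : Int) : List (List Int) :=
  g.set r ((g.getD r []).set c v)

-- Port of A. Python's indices here are nonnegative and in range on every input where A
-- returns (Pre_), so List.getD is exact there. Python's write-then-conditional
-- `-= 9` pair touches a single cell; it is ported as one write of the conditional value.
def generate_new_map (map : List (List Int)) : List (List Int) :=
  let rows := map.length
  let cols := (map.headD []).length
  let newmap : List (List Int) := List.replicate (cols * 5) (List.replicate (rows * 5) (0 : Int))
  -- add 4 grids to the right of original
  let newmap := (List.range 5).foldl (fun g i =>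
    (List.range rows).foldl (fun g x =>
      (List.range cols).foldl (fun g y =>
        pvSetCell g x (y + i * cols)
          (if (map.getD x []).getD y 0 + (i : Int) > 9
           then (map.getD x []).getD y 0 + (i : Int) - 9
           else (map.getD x []).getD y 0 + (i : Int))) g) g) newmap
  -- add 4 grids below the new grid
  let cols2 := (newmap.headD []).length
  (List.range 5).foldl (fun g i =>
    (List.range rows).foldl (fun g x =>
      (List.range cols2).foldl (fun g y =>
        pvSetCell g (x + i * rows) y
          (if (g.getD x []).getD y 0 + (i : Int) > 9
           then (g.getD x []).getD y 0 + (i : Int) - 9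
           else (g.getD x []).getD y 0 + (i : Int))) g) g) newmap

-- ===== PORT B =====
def pvWrap (v : Int) : Int := if v > 9 then v - 9 else v

-- Port of B: one direct fill of the preallocated grid; each cell written once.
def generate_new_map_alt (map : List (List Int)) : List (List Int) :=
  let rows := map.length
  let cols := (map.headD []).length
  let newmap : List (List Int) := List.replicate (cols * 5) (List.replicate (rows * 5) (0 : Int))
  (List.range 5).foldl (fun g ti =>
    (List.range 5).foldl (fun g tj =>
      (List.range rows).foldl (fun g x =>
        (List.range cols).foldl (fun g y =>
          pvSetCell g (x + tj * rows) (y + ti * cols)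
            (pvWrap (pvWrap ((map.getD x []).getD y 0 + (ti : Int)) + (tj : Int)))) g) g) g) newmap

-- ===== PRECONDITION & SPEC =====
-- Pre_ = the inputs where A returns (a nonempty grid whose first-row width equals its
-- height, every row at least that wide; anything else hits an out-of-range index in
-- A's swapped allocation), RESTRICTED to grids whose read entries are at most 19:
-- above 19 wrapping an out-of-range risk level is unspecified and A's two pass
-- structures give different, equally defensible values: neither pass order is canonical there.
def Pre_generate_new_map (map : List (List Int)) : Prop :=
  map ≠ [] ∧ (map.headD []).length = map.length ∧ (∀ row ∈ map, map.length ≤ row.length) ∧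
    ∀ x < map.length, ∀ y < map.length, (map.getD x []).getD y 0 ≤ 19

instance (map : List (List Int)) : Decidable (Pre_generate_new_map map) := by
  unfold Pre_generate_new_map; infer_instance

def pvWitness_generate_new_map : List (List Int) := [[1, 2], [3, 4]]

def Spec_generate_new_map (map : List (List Int)) (out : List (List Int)) : Prop := out = generate_new_map_alt map
instance (map : List (List Int)) (out : List (List Int)) : Decidable (Spec_generate_new_map map out) := by unfold Spec_generate_new_map; infer_instance

-- ===== CLAIM (what is proved, stated in full; the proofs are below) =====
def Claim_equal_generate_new_map : Prop := ∀ (map : List (List Int)), Dom_generate_new_map map → Pre_generate_new_map map → Spec_generate_new_map map (generate_new_map map)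



-- ===== LEMMAS AND PROOFS =====

-- A rectangular grid given by a cell function.
def gridOf (R C : Nat) (F : Nat → Nat → Int) : List (List Int) :=
  (List.range R).map (fun r => (List.range C).map (F r))

theorem gridOf_congr {R C : Nat} {F G : Nat → Nat → Int}
    (h : ∀ r < R, ∀ c < C, F r c = G r c) : gridOf R C F = gridOf R C G := by
  unfold gridOf
  refine List.map_congr_left (fun r hr => ?_)
  exact List.map_congr_left (fun c hc => h r (List.mem_range.mp hr) c (List.mem_range.mp hc))

theorem gridOf_read {R C : Nat} (F : Nat → Nat → Int) {r c : Nat}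
    (hr : r < R) (hc : c < C) : (((gridOf R C F).getD r []).getD c 0) = F r c := by
  simp [gridOf, List.getD, hr, hc]

theorem gridOf_head_length {R C : Nat} (F : Nat → Nat → Int) (hR : 0 < R) :
    ((gridOf R C F).headD []).length = C := by
  obtain ⟨R', rfl⟩ := Nat.exists_eq_succ_of_ne_zero (Nat.pos_iff_ne_zero.mp hR)
  simp [gridOf, List.range_succ_eq_map]

theorem replicate_gridOf (R C : Nat) :
    List.replicate R (List.replicate C (0 : Int)) = gridOf R C (fun _ _ => 0) := by
  simp [gridOf, List.map_const']

theorem div_mod_block {n k r : Nat} (hn : 0 < n) (h1 : k * n ≤ r) (h2 : r < k * n + n) :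
    r / n = k ∧ r % n = r - k * n := by
  have he : r = (r - k * n) + k * n := by omega
  constructor
  · rw [he, Nat.add_mul_div_right _ _ hn, Nat.div_eq_of_lt (by omega)]
    omega
  · rw [he, Nat.add_mul_mod_self_right, Nat.mod_eq_of_lt (by omega)]
    omega

theorem pvSetCell_gridOf {R C : Nat} (F : Nat → Nat → Int) {r c : Nat} (v : Int)
    (hr : r < R) (hc : c < C) :
    pvSetCell (gridOf R C F) r c v
      = gridOf R C (fun r' c' => if r' = r ∧ c' = c then v else F r' c') := by
  unfold pvSetCell gridOf
  apply List.ext_getElem (by simp)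
  intro i h1 _
  simp only [List.length_map, List.length_range, List.length_set] at h1
  simp only [List.getElem_set, List.getElem_map, List.getElem_range, List.getD,
    List.getElem?_map, List.getElem?_range, hr, Option.map_some, Option.getD_some]
  split_ifs with hri
  · subst hri
    apply List.ext_getElem (by simp)
    intro j hj1 hj2
    simp only [List.length_set, List.length_map, List.length_range] at hj1
    simp only [List.getElem_set, List.getElem_map, List.getElem_range]
    split_ifs with h3 h4 h4
    · rfl
    · exact absurd ⟨trivial, h3.symm⟩ h4
    · exact absurd h4.2.symm h3
    · rfl
  · apply List.map_congr_left
    intro j hj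
    rw [if_neg (fun hh => hri (hh.1.symm))]

theorem L1y {R C : Nat} (off k x : Nat) (v : Nat → Int) (F : Nat → Nat → Int)
    (hx : x < R) (hk : off + k ≤ C) :
    (List.range k).foldl (fun g y => pvSetCell g x (y + off) (v y)) (gridOf R C F)
      = gridOf R C (fun r c => if r = x ∧ off ≤ c ∧ c < off + k then v (c - off) else F r c) := by
  induction k with
  | zero =>
    simp only [List.range_zero, List.foldl_nil]
    exact gridOf_congr (fun r hr c hc => by
      rw [if_neg (fun hh => by omega)])
  | succ k ih =>
    rw [List.range_succ, List.foldl_append, ih (by omega), List.foldl_cons, List.foldl_nil,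
      pvSetCell_gridOf _ _ hx (by omega)]
    apply gridOf_congr
    intro r hr c hc
    by_cases hrx : r = x
    · subst hrx
      by_cases hck : c = k + off
      · subst hck
        rw [if_pos ⟨rfl, rfl⟩, if_pos ⟨rfl, by omega, by omega⟩]
        congr 1
        omega
      · rw [if_neg (fun hh => hck hh.2)]
        by_cases hb : off ≤ c ∧ c < off + k
        · rw [if_pos ⟨rfl, hb.1, hb.2⟩, if_pos ⟨rfl, hb.1, by omega⟩]
        · rw [if_neg (fun hh => hb ⟨hh.2.1, hh.2.2⟩), if_neg (by omega)]
    · rw [if_neg (fun hh => hrx hh.1), if_neg (fun hh => hrx hh.1), if_neg (fun hh => hrx hh.1)]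

theorem L1x {R C : Nat} (off n k : Nat) (v : Nat → Nat → Int) (F : Nat → Nat → Int)
    (hk : k ≤ R) (hn : off + n ≤ C) :
    (List.range k).foldl (fun g x =>
        (List.range n).foldl (fun g y => pvSetCell g x (y + off) (v x y)) g) (gridOf R C F)
      = gridOf R C (fun r c => if r < k ∧ off ≤ c ∧ c < off + n then v r (c - off) else F r c) := by
  induction k with
  | zero =>
    simp only [List.range_zero, List.foldl_nil]
    exact gridOf_congr (fun r hr c hc => by rw [if_neg (by omega)])
  | succ k ih =>
    rw [List.range_succ, List.foldl_append, ih (by omega)]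
    simp only [List.foldl_cons, List.foldl_nil]
    rw [L1y off n k (v k) _ (by omega) hn]
    apply gridOf_congr
    intro r hr c hc
    by_cases hb : off ≤ c ∧ c < off + n
    · by_cases hrk : r = k
      · subst hrk
        rw [if_pos ⟨rfl, hb.1, hb.2⟩, if_pos ⟨by omega, hb.1, hb.2⟩]
      · rw [if_neg (fun hh => hrk hh.1)]
        by_cases hlt : r < k
        · rw [if_pos ⟨hlt, hb.1, hb.2⟩, if_pos ⟨by omega, hb.1, hb.2⟩]
        · rw [if_neg (by omega), if_neg (by omega)]
    · rw [if_neg (by omega), if_neg (by omega), if_neg (by omega)]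

theorem L1i {R C : Nat} (n m k : Nat) (v : Nat → Nat → Nat → Int) (F : Nat → Nat → Int)
    (hn : 0 < n) (hm : m ≤ R) (hk : k * n ≤ C) :
    (List.range k).foldl (fun g i =>
        (List.range m).foldl (fun g x =>
          (List.range n).foldl (fun g y => pvSetCell g x (y + i * n) (v i x y)) g) g) (gridOf R C F)
      = gridOf R C (fun r c => if r < m ∧ c < k * n then v (c / n) r (c % n) else F r c) := by
  induction k with
  | zero =>
    simp only [List.range_zero, List.foldl_nil]
    exact gridOf_congr (fun r hr c hc => by rw [if_neg (by omega)])
  | succ k ih =>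
    have hsm : (k + 1) * n = k * n + n := by ring
    rw [hsm] at hk
    simp only [hsm]
    rw [List.range_succ, List.foldl_append, ih (by omega)]
    simp only [List.foldl_cons, List.foldl_nil]
    rw [L1x (k * n) n m (v k) _ hm (by omega)]
    apply gridOf_congr
    intro r hr c hc
    by_cases hrm : r < m
    · by_cases h1 : k * n ≤ c ∧ c < k * n + n
      · obtain ⟨hd, hmo⟩ := div_mod_block hn h1.1 h1.2
        rw [if_pos ⟨hrm, h1.1, h1.2⟩, if_pos ⟨hrm, by omega⟩, hd, hmo]
      · rw [if_neg (by omega)]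
        by_cases h2 : c < k * n
        · rw [if_pos ⟨hrm, h2⟩, if_pos ⟨hrm, by omega⟩]
        · rw [if_neg (by omega), if_neg (by omega)]
    · rw [if_neg (by omega), if_neg (by omega), if_neg (by omega)]

theorem L2y {R C : Nat} (t x k : Nat) (w2 : Int → Int) (F : Nat → Nat → Int)
    (ht : t < R) (hx : x < R) (hk : k ≤ C) :
    (List.range k).foldl (fun g y => pvSetCell g t y (w2 ((g.getD x []).getD y 0))) (gridOf R C F)
      = gridOf R C (fun r c => if r = t ∧ c < k then w2 (F x c) else F r c) := by
  induction k with
  | zero =>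
    simp only [List.range_zero, List.foldl_nil]
    exact gridOf_congr (fun r hr c hc => by rw [if_neg (by omega)])
  | succ k ih =>
    rw [List.range_succ, List.foldl_append, ih (by omega)]
    simp only [List.foldl_cons, List.foldl_nil]
    rw [gridOf_read _ hx (show k < C by omega)]
    rw [if_neg (show ¬ (x = t ∧ k < k) from fun hh => absurd hh.2 (Nat.lt_irrefl k))]
    rw [pvSetCell_gridOf _ _ ht (show k < C by omega)]
    apply gridOf_congr
    intro r hr c hc
    by_cases hrt : r = t
    · subst hrt
      by_cases hck : c = k
      · subst hck
        rw [if_pos ⟨rfl, rfl⟩, if_pos ⟨rfl, by omega⟩]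
      · rw [if_neg (fun hh => hck hh.2)]
        by_cases hlt : c < k
        · rw [if_pos ⟨rfl, hlt⟩, if_pos ⟨rfl, by omega⟩]
        · rw [if_neg (by omega), if_neg (by omega)]
    · rw [if_neg (fun hh => hrt hh.1), if_neg (fun hh => hrt hh.1), if_neg (fun hh => hrt hh.1)]

theorem L2x {R C : Nat} (off k C2 : Nat) (w2 : Int → Int) (F : Nat → Nat → Int)
    (hsep : off = 0 ∨ k ≤ off) (hR : off + k ≤ R) (hC2 : C2 ≤ C) :
    (List.range k).foldl (fun g x =>
        (List.range C2).foldl (fun g y => pvSetCell g (x + off) y (w2 ((g.getD x []).getD y 0))) g) (gridOf R C F)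
      = gridOf R C (fun r c => if off ≤ r ∧ r < off + k ∧ c < C2 then w2 (F (r - off) c) else F r c) := by
  induction k with
  | zero =>
    simp only [List.range_zero, List.foldl_nil]
    exact gridOf_congr (fun r hr c hc => by rw [if_neg (by omega)])
  | succ k ih =>
    rw [List.range_succ, List.foldl_append, ih (by omega) (by omega)]
    simp only [List.foldl_cons, List.foldl_nil]
    rw [L2y (k + off) k C2 w2 _ (by omega) (by omega) hC2]
    apply gridOf_congr
    intro r hr c hc
    have hread : ¬ (off ≤ k ∧ k < off + k ∧ c < C2) := by omega
    rw [if_neg hread]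
    by_cases hrk : r = k + off
    · subst hrk
      by_cases hc2 : c < C2
      · rw [if_pos ⟨rfl, hc2⟩, if_pos ⟨by omega, by omega, hc2⟩,
           show k + off - off = k from by omega]
      · rw [if_neg (fun hh => hc2 hh.2), if_neg (by omega), if_neg (by omega)]
    · rw [if_neg (fun hh => hrk hh.1)]
      by_cases hin : off ≤ r ∧ r < off + k ∧ c < C2
      · rw [if_pos ⟨hin.1, hin.2.1, hin.2.2⟩, if_pos ⟨hin.1, by omega, hin.2.2⟩]
      · rw [if_neg (by omega), if_neg (by omega)]

theorem L2i {R C : Nat} (n k C2 : Nat) (w2 : Nat → Int → Int) (F : Nat → Nat → Int)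
    (hn : 0 < n) (hk : k * n ≤ R) (hC2 : C2 ≤ C) :
    (List.range k).foldl (fun g i =>
        (List.range n).foldl (fun g x =>
          (List.range C2).foldl (fun g y => pvSetCell g (x + i * n) y (w2 i ((g.getD x []).getD y 0))) g) g) (gridOf R C F)
      = gridOf R C (fun r c => if r < k * n ∧ c < C2 then
          (if r < n then w2 0 (F r c) else w2 (r / n) (w2 0 (F (r % n) c))) else F r c) := by
  induction k with
  | zero =>
    simp only [List.range_zero, List.foldl_nil]
    exact gridOf_congr (fun r hr c hc => by rw [if_neg (by omega)])
  | succ k ih =>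
    have hsm : (k + 1) * n = k * n + n := by ring
    rw [hsm] at hk
    simp only [hsm]
    rw [List.range_succ, List.foldl_append, ih (by omega)]
    simp only [List.foldl_cons, List.foldl_nil]
    rw [L2x (k * n) n C2 (w2 k) _
      (by rcases Nat.eq_zero_or_pos k with h0 | h1
          · left; rw [h0]; ring
          · right; exact Nat.le_mul_of_pos_left n h1)
      (by omega) hC2]
    apply gridOf_congr
    intro r hr c hc
    by_cases hc2 : c < C2
    · by_cases h1 : k * n ≤ r ∧ r < k * n + n
      · rw [if_pos (show k * n ≤ r ∧ r < k * n + n ∧ c < C2 from ⟨h1.1, h1.2, hc2⟩),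
          if_pos (show r < k * n + n ∧ c < C2 from ⟨by omega, hc2⟩)]
        rcases Nat.eq_zero_or_pos k with hk0 | hk1
        · subst hk0
          rw [if_neg (show ¬ (r - 0 * n < 0 * n ∧ c < C2) from by omega),
            if_pos (show r < n from by omega),
            show r - 0 * n = r from by omega]
        · have hnk : n ≤ k * n := Nat.le_mul_of_pos_left n hk1
          obtain ⟨hd, hmo⟩ := div_mod_block hn h1.1 h1.2
          rw [if_pos (show r - k * n < k * n ∧ c < C2 from ⟨by omega, hc2⟩),
            if_pos (show r - k * n < n from by omega),
            if_neg (show ¬ r < n from by omega), hd, hmo]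
      · rw [if_neg (show ¬ (k * n ≤ r ∧ r < k * n + n ∧ c < C2) from by omega)]
        by_cases h2 : r < k * n
        · rw [if_pos (show r < k * n ∧ c < C2 from ⟨h2, hc2⟩),
            if_pos (show r < k * n + n ∧ c < C2 from ⟨by omega, hc2⟩)]
        · rw [if_neg (show ¬ (r < k * n ∧ c < C2) from by omega),
            if_neg (show ¬ (r < k * n + n ∧ c < C2) from by omega)]
    · rw [if_neg (show ¬ (k * n ≤ r ∧ r < k * n + n ∧ c < C2) from by omega),
        if_neg (show ¬ (r < k * n ∧ c < C2) from by omega),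
        if_neg (show ¬ (r < k * n + n ∧ c < C2) from by omega)]

theorem L1xo {R C : Nat} (roff off n k : Nat) (v : Nat → Nat → Int) (F : Nat → Nat → Int)
    (hk : roff + k ≤ R) (hn : off + n ≤ C) :
    (List.range k).foldl (fun g x =>
        (List.range n).foldl (fun g y => pvSetCell g (x + roff) (y + off) (v x y)) g) (gridOf R C F)
      = gridOf R C (fun r c =>
          if roff ≤ r ∧ r < roff + k ∧ off ≤ c ∧ c < off + n then v (r - roff) (c - off) else F r c) := by
  induction k with
  | zero =>
    simp only [List.range_zero, List.foldl_nil]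
    exact gridOf_congr (fun r hr c hc => by rw [if_neg (by omega)])
  | succ k ih =>
    rw [List.range_succ, List.foldl_append, ih (by omega)]
    simp only [List.foldl_cons, List.foldl_nil]
    rw [L1y off n (k + roff) (v k) _ (by omega) hn]
    apply gridOf_congr
    intro r hr c hc
    by_cases hb : off ≤ c ∧ c < off + n
    · by_cases hrk : r = k + roff
      · subst hrk
        rw [if_pos ⟨rfl, hb.1, hb.2⟩, if_pos ⟨by omega, by omega, hb.1, hb.2⟩,
          show k + roff - roff = k from by omega]
      · rw [if_neg (fun hh => hrk hh.1)]
        by_cases hin : roff ≤ r ∧ r < roff + k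
        · rw [if_pos ⟨hin.1, hin.2, hb.1, hb.2⟩, if_pos ⟨hin.1, by omega, hb.1, hb.2⟩]
        · rw [if_neg (by omega), if_neg (by omega)]
    · rw [if_neg (by omega), if_neg (by omega), if_neg (by omega)]

theorem Ltj {R C : Nat} (m n off kk : Nat) (v : Nat → Nat → Nat → Int) (F : Nat → Nat → Int)
    (hm : 0 < m) (hk : kk * m ≤ R) (hn : off + n ≤ C) :
    (List.range kk).foldl (fun g tj =>
        (List.range m).foldl (fun g x =>
          (List.range n).foldl (fun g y => pvSetCell g (x + tj * m) (y + off) (v tj x y)) g) g) (gridOf R C F)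
      = gridOf R C (fun r c =>
          if r < kk * m ∧ off ≤ c ∧ c < off + n then v (r / m) (r % m) (c - off) else F r c) := by
  induction kk with
  | zero =>
    simp only [List.range_zero, List.foldl_nil]
    exact gridOf_congr (fun r hr c hc => by rw [if_neg (by omega)])
  | succ kk ih =>
    have hsm : (kk + 1) * m = kk * m + m := by ring
    rw [hsm] at hk
    simp only [hsm]
    rw [List.range_succ, List.foldl_append, ih (by omega)]
    simp only [List.foldl_cons, List.foldl_nil]
    rw [L1xo (kk * m) off n m (v kk) _ (by omega) hn]
    apply gridOf_congr
    intro r hr c hc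
    by_cases hb : off ≤ c ∧ c < off + n
    · by_cases h1 : kk * m ≤ r ∧ r < kk * m + m
      · obtain ⟨hd, hmo⟩ := div_mod_block hm h1.1 h1.2
        rw [if_pos ⟨h1.1, h1.2, hb.1, hb.2⟩, if_pos ⟨by omega, hb.1, hb.2⟩, hd, hmo]
      · rw [if_neg (by omega)]
        by_cases h2 : r < kk * m
        · rw [if_pos ⟨h2, hb.1, hb.2⟩, if_pos ⟨by omega, hb.1, hb.2⟩]
        · rw [if_neg (by omega), if_neg (by omega)]
    · rw [if_neg (by omega), if_neg (by omega), if_neg (by omega)]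

theorem Lti {R C : Nat} (m n K kk : Nat) (v : Nat → Nat → Nat → Nat → Int) (F : Nat → Nat → Int)
    (hm : 0 < m) (hn : 0 < n) (hR : kk * m ≤ R) (hC : K * n ≤ C) :
    (List.range K).foldl (fun g ti =>
        (List.range kk).foldl (fun g tj =>
          (List.range m).foldl (fun g x =>
            (List.range n).foldl (fun g y =>
              pvSetCell g (x + tj * m) (y + ti * n) (v ti tj x y)) g) g) g) (gridOf R C F)
      = gridOf R C (fun r c =>
          if r < kk * m ∧ c < K * n then v (c / n) (r / m) (r % m) (c % n) else F r c) := by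
  induction K with
  | zero =>
    simp only [List.range_zero, List.foldl_nil]
    exact gridOf_congr (fun r hr c hc => by rw [if_neg (by omega)])
  | succ K ih =>
    have hsm : (K + 1) * n = K * n + n := by ring
    rw [hsm] at hC
    simp only [hsm]
    rw [List.range_succ, List.foldl_append, ih (by omega)]
    simp only [List.foldl_cons, List.foldl_nil]
    rw [Ltj m n (K * n) kk (fun tj x y => v K tj x y) _ hm hR (by omega)]
    apply gridOf_congr
    intro r hr c hc
    by_cases hrk : r < kk * m
    · by_cases h1 : K * n ≤ c ∧ c < K * n + n
      · obtain ⟨hd, hmo⟩ := div_mod_block hn h1.1 h1.2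
        rw [if_pos ⟨hrk, h1.1, h1.2⟩, if_pos ⟨hrk, by omega⟩, hd, hmo]
      · rw [if_neg (by omega)]
        by_cases h2 : c < K * n
        · rw [if_pos ⟨hrk, h2⟩, if_pos ⟨hrk, by omega⟩]
        · rw [if_neg (by omega), if_neg (by omega)]
    · rw [if_neg (by omega), if_neg (by omega), if_neg (by omega)]

theorem main_eq (map : List (List Int)) (h : Pre_generate_new_map map) :
    generate_new_map map = generate_new_map_alt map := by
  obtain ⟨hne, hhead, hrows, hbound⟩ := h
  have hn0 : 0 < map.length := List.length_pos_of_ne_nil hne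
  simp only [generate_new_map, generate_new_map_alt, hhead]
  rw [replicate_gridOf]
  simp only [L1i (R := map.length * 5) (C := map.length * 5) map.length map.length 5
    (fun i x y => if (map.getD x []).getD y 0 + (i : Int) > 9
      then (map.getD x []).getD y 0 + (i : Int) - 9
      else (map.getD x []).getD y 0 + (i : Int))
    (fun _ _ => 0) hn0 (by omega) (by omega)]
  rw [gridOf_head_length _ (by omega)]
  simp only [L2i (R := map.length * 5) (C := map.length * 5) map.length 5 (map.length * 5)
    (fun i a => if a + (i : Int) > 9 then a + (i : Int) - 9 else a + (i : Int))
    (fun r c => if r < map.length ∧ c < 5 * map.length then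
      (if (map.getD r []).getD (c % map.length) 0 + ((c / map.length : Nat) : Int) > 9 then
        (map.getD r []).getD (c % map.length) 0 + ((c / map.length : Nat) : Int) - 9
      else (map.getD r []).getD (c % map.length) 0 + ((c / map.length : Nat) : Int))
      else 0)
    hn0 (by omega) (le_refl _)]
  simp only [Lti (R := map.length * 5) (C := map.length * 5) map.length map.length 5 5
    (fun ti tj x y => pvWrap (pvWrap ((map.getD x []).getD y 0 + (ti : Int)) + (tj : Int)))
    (fun _ _ => 0) hn0 hn0 (by omega) (by omega)]
  apply gridOf_congr
  intro r hr c hc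
  have hrm : r % map.length < map.length := Nat.mod_lt r hn0
  have hcm : c % map.length < map.length := Nat.mod_lt c hn0
  have hti : c / map.length < 5 := Nat.div_lt_of_lt_mul (by omega)
  have hti' : ((c / map.length : Nat) : Int) ≤ 4 := by exact_mod_cast Nat.lt_succ_iff.mp hti
  by_cases hj : r < map.length
  · have hr0 : r / map.length = 0 := Nat.div_eq_of_lt hj
    have hrmm : r % map.length = r := Nat.mod_eq_of_lt hj
    rw [if_pos (show r < 5 * map.length ∧ c < map.length * 5 from ⟨by omega, by omega⟩),
      if_pos hj,
      if_pos (show r < map.length ∧ c < 5 * map.length from ⟨hj, by omega⟩),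
      if_pos (show r < 5 * map.length ∧ c < 5 * map.length from ⟨by omega, by omega⟩),
      hr0, hrmm]
    simp [pvWrap]
  · have h1 : 0 < r / map.length := Nat.div_pos (by omega) hn0
    have htj : r / map.length < 5 := Nat.div_lt_of_lt_mul (by omega)
    have htj' : ((r / map.length : Nat) : Int) ≤ 4 := by exact_mod_cast Nat.lt_succ_iff.mp htj
    have hm : (map.getD (r % map.length) []).getD (c % map.length) 0 ≤ 19 :=
      hbound _ hrm _ hcm
    rw [if_pos (show r < 5 * map.length ∧ c < map.length * 5 from ⟨by omega, by omega⟩),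
      if_neg hj,
      if_pos (show r % map.length < map.length ∧ c < 5 * map.length from ⟨hrm, by omega⟩),
      if_pos (show r < 5 * map.length ∧ c < 5 * map.length from ⟨by omega, by omega⟩)]
    simp only [pvWrap, Nat.cast_zero, add_zero]
    split_ifs <;> omega

-- ===== VERDICT (by name: the statement is the Claim_ definition above) =====
theorem generate_new_map_spec : Claim_equal_generate_new_map := by
  intro map _ hpre
  unfold Spec_generate_new_map
  exact main_eq map hpre
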